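-- pv_equiv track=rewrite | github.com/BabaGata/ProjektniSah | preprocessing.py | format_moves
-- ===== SOURCE A (Python) =====
-- def format_moves(moves_str):
--     """Format move sequence correctly for PGN by adding move numbers."""
--     moves = moves_str.split()
--     formatted_moves = []
--
--     for i in range(0, len(moves), 2):
--         move_number = (i // 2) + 1
--         move_pair = f"{move_number}. {moves[i]}"
--         if i + 1 < len(moves):
--             move_pair += f" {moves[i + 1]}"
--         formatted_moves.append(move_pair)
--
--     return " ".join(formatted_moves)
-- ===== SOURCE B (Python) =====
-- def format_moves(moves_str):
--     """Format move sequence correctly for PGN by adding move numbers."""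
--     tokens = []
--     for i, move in enumerate(moves_str.split()):
--         if i % 2 == 0:
--             tokens.append(f"{i // 2 + 1}. {move}")
--         else:
--             tokens.append(move)
--     return " ".join(tokens)
-- ===== Notes on version B (the rewrite author's own statement) =====
-- stated objective: simpler
-- what changed: Replaces the step-2 index loop that builds pair strings with optional lookahead moves[i+1] by a single flat per-move enumerate pass that numbers even-indexed moves and leaves odd ones unchanged, joining all tokens once.
import Mathlib
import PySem

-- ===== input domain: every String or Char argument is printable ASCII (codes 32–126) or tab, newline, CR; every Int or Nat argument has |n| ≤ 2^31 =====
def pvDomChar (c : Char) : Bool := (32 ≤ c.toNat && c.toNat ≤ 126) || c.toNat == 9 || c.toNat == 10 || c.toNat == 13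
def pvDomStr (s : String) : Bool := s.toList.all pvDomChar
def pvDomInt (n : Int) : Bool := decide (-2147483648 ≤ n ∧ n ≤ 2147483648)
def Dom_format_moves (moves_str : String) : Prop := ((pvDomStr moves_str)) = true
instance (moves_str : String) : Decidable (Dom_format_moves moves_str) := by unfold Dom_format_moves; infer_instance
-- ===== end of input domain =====

-- B replaces A's step-2 index loop (pair strings built with a moves[i+1] lookahead) by one
-- flat per-move enumerate pass that numbers even-indexed moves; objective: simpler.


-- ===== PORT A =====
-- moves[i] / moves[i+1] are always in range in A's loop, so pyGetD with an unused default is exact.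
def format_moves (moves_str : String) : String :=
  let moves := PySem.Str.split₀ moves_str
  let formatted_moves : List String :=
    (PySem.List.pyRange 0 (PySem.List.len moves) 2).foldl
      (fun acc i =>
        let move_number := PySem.Int.floordiv i 2 + 1
        let move_pair := PySem.Int.toStr move_number ++ ". " ++ PySem.List.pyGetD moves i ""
        let move_pair :=
          if i + 1 < PySem.List.len moves then
            move_pair ++ " " ++ PySem.List.pyGetD moves (i + 1) ""
          else move_pair
        acc ++ [move_pair]) []
  PySem.Str.join " " formatted_moves

-- ===== PORT B =====
def format_moves_alt (moves_str : String) : String :=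
  let tokens : List String :=
    (PySem.List.enumerate (PySem.Str.split₀ moves_str) 0).map
      (fun p =>
        if PySem.Int.mod p.1 2 = 0 then
          PySem.Int.toStr (PySem.Int.floordiv p.1 2 + 1) ++ ". " ++ p.2
        else p.2)
  PySem.Str.join " " tokens

-- ===== PRECONDITION & SPEC =====
def Spec_format_moves (moves_str : String) (out : String) : Prop := out = format_moves_alt moves_str
instance (moves_str : String) (out : String) : Decidable (Spec_format_moves moves_str out) := by unfold Spec_format_moves; infer_instance

-- ===== CLAIM (what is proved, stated in full; the proofs are below) =====
def Claim_equal_format_moves : Prop := ∀ (moves_str : String), Dom_format_moves moves_str → Spec_format_moves moves_str (format_moves moves_str)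

-- ===== LEMMAS AND PROOFS =====

-- A's per-iteration token, as a function of the loop index.
def pvTokA (full : List String) (i : Int) : String :=
  let move_number := PySem.Int.floordiv i 2 + 1
  let move_pair := PySem.Int.toStr move_number ++ ". " ++ PySem.List.pyGetD full i ""
  if i + 1 < PySem.List.len full then
    move_pair ++ " " ++ PySem.List.pyGetD full (i + 1) ""
  else move_pair

-- B's per-move token at global index s.
def pvTokB (s : Int) (x : String) : String :=
  if PySem.Int.mod s 2 = 0 then
    PySem.Int.toStr (PySem.Int.floordiv s 2 + 1) ++ ". " ++ x
  else x

-- A's token list, structurally (move number c+1 at the head).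
def pvPairsA : Nat → List String → List String
  | _, [] => []
  | c, [x] => [PySem.Int.toStr ((c : Int) + 1) ++ ". " ++ x]
  | c, x :: y :: rest =>
      (PySem.Int.toStr ((c : Int) + 1) ++ ". " ++ x ++ " " ++ y) :: pvPairsA (c + 1) rest

-- B's token list, structurally (global index s at the head).
def pvFlatB : Int → List String → List String
  | _, [] => []
  | s, x :: xs => pvTokB s x :: pvFlatB (s + 1) xs

theorem pv_mod_even (c : Nat) : PySem.Int.mod ((2 * c : Nat) : Int) 2 = 0 := by
  show Int.fmod _ _ = _
  rw [Int.fmod_eq_emod]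
  omega

theorem pv_mod_odd (c : Nat) : PySem.Int.mod (((2 * c : Nat) : Int) + 1) 2 = 1 := by
  show Int.fmod _ _ = _
  rw [Int.fmod_eq_emod]
  omega

theorem pv_fdiv_even (c : Nat) : PySem.Int.floordiv ((2 * c : Nat) : Int) 2 = (c : Int) := by
  show Int.fdiv _ _ = _
  rw [Int.fdiv_eq_ediv]
  omega

theorem pvPyRange_two_cons (a b : Int) (h : a < b) :
    PySem.List.pyRange a b 2 = a :: PySem.List.pyRange (a + 2) b 2 := by
  rw [PySem.List.pyRange_of_pos a b (by norm_num),
      PySem.List.pyRange_of_pos (a + 2) b (by norm_num)]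
  have hN : (if a < b then ((b - a + 2 - 1) / 2).toNat else 0)
      = (if a + 2 < b then ((b - (a + 2) + 2 - 1) / 2).toNat else 0) + 1 := by
    split_ifs <;> omega
  rw [hN, List.range_succ_eq_map, List.map_cons, List.map_map]
  refine congrArg₂ List.cons (by simp) ?_
  refine List.map_congr_left ?_
  intro k _
  simp only [Function.comp_apply]
  push_cast
  ring

theorem pvPyRange_two_nil (a b : Int) (h : b ≤ a) :
    PySem.List.pyRange a b 2 = [] := by
  rw [PySem.List.pyRange_of_pos a b (by norm_num), if_neg (not_lt.mpr h)]
  simp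

theorem pvGetD_of_drop (full tail : List String) (n k : Nat) (h : full.drop n = tail) :
    full.getD (n + k) "" = tail.getD k "" := by
  have h1 : full[n + k]? = tail[k]? := by
    rw [← h, List.getElem?_drop]
  simp [List.getD_eq_getElem?_getD, h1]

theorem pvL1 : ∀ (ms full : List String) (c : Nat), full.drop (2 * c) = ms →
    (PySem.List.pyRange ((2 * c : Nat) : Int) (PySem.List.len full) 2).map (pvTokA full)
      = pvPairsA c ms
  | [], full, c, h => by
      have hle : full.length ≤ 2 * c := List.drop_eq_nil_iff.mp h
      rw [pvPyRange_two_nil _ _ (by simp; omega)]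
      simp [pvPairsA]
  | [x], full, c, h => by
      have h1 := congrArg List.length h
      simp only [List.length_drop, List.length_cons, List.length_nil] at h1
      have hlen : full.length = 2 * c + 1 := by
        rcases Nat.lt_or_ge (2 * c) full.length with h2 | h2
        · omega
        · rw [List.drop_eq_nil_iff.mpr h2] at h; simp at h
      have hx : PySem.List.pyGetD full ((2 * c : Nat) : Int) "" = x := by
        rw [PySem.List.pyGetD_natCast]
        have h3 := pvGetD_of_drop full [x] (2 * c) 0 h
        simpa using h3
      rw [pvPyRange_two_cons _ _ (by simp; omega),
          pvPyRange_two_nil _ _ (by simp; omega)]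
      simp only [List.map_cons, List.map_nil, pvTokA, pvPairsA]
      rw [if_neg (by simp; omega), hx, pv_fdiv_even]
  | x :: y :: rest, full, c, h => by
      have h1 := congrArg List.length h
      simp only [List.length_drop, List.length_cons] at h1
      have hge : 2 * c < full.length := by
        rcases Nat.lt_or_ge (2 * c) full.length with h2 | h2
        · exact h2
        · rw [List.drop_eq_nil_iff.mpr h2] at h; simp at h
      have hlen : full.length = 2 * c + 2 + rest.length := by omega
      have h2 := congrArg (List.drop 2) h
      rw [List.drop_drop] at h2
      have hrest : full.drop (2 * (c + 1)) = rest := by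
        rw [show 2 * (c + 1) = 2 * c + 2 by ring, h2]; simp
      have hx : PySem.List.pyGetD full ((2 * c : Nat) : Int) "" = x := by
        rw [PySem.List.pyGetD_natCast]
        have h3 := pvGetD_of_drop full (x :: y :: rest) (2 * c) 0 h
        simpa using h3
      have hy : PySem.List.pyGetD full (((2 * c : Nat) : Int) + 1) "" = y := by
        rw [show ((2 * c : Nat) : Int) + 1 = ((2 * c + 1 : Nat) : Int) by push_cast; ring,
            PySem.List.pyGetD_natCast]
        have h3 := pvGetD_of_drop full (x :: y :: rest) (2 * c) 1 h
        simpa using h3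
      have htail : ((2 * c : Nat) : Int) + 2 = ((2 * (c + 1) : Nat) : Int) := by push_cast; ring
      rw [pvPyRange_two_cons _ _ (by simp; omega), List.map_cons, htail,
          pvL1 rest full (c + 1) hrest]
      simp only [pvTokA, pvPairsA]
      rw [if_pos (by simp; omega), hx, hy, pv_fdiv_even]

theorem pvL2 : ∀ (ms : List String) (s : Int),
    (PySem.List.enumerate ms s).map
      (fun p =>
        if PySem.Int.mod p.1 2 = 0 then
          PySem.Int.toStr (PySem.Int.floordiv p.1 2 + 1) ++ ". " ++ p.2
        else p.2)
      = pvFlatB s ms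
  | [], s => by simp [pvFlatB, PySem.List.enumerate_nil]
  | x :: xs, s => by
      rw [PySem.List.enumerate_cons, List.map_cons, pvL2 xs (s + 1)]
      simp [pvFlatB, pvTokB]

theorem pvStr_eq_of_toList {s t : String} (h : s.toList = t.toList) : s = t :=
  String.toList_inj.mp h

theorem pvJoin_singleton (a : String) : PySem.Str.join " " [a] = a := by
  apply pvStr_eq_of_toList
  simp [PySem.Str.toList_join, PySem.Chars.join_singleton]

theorem pvJoin_cons_cons (a b : String) (rest : List String) :
    PySem.Str.join " " (a :: b :: rest) = a ++ " " ++ PySem.Str.join " " (b :: rest) := by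
  apply pvStr_eq_of_toList
  simp [PySem.Str.toList_join, PySem.Chars.join_cons_cons]

theorem pvJoin_cons_ne (a : String) (L : List String) (h : L ≠ []) :
    PySem.Str.join " " (a :: L) = a ++ " " ++ PySem.Str.join " " L := by
  cases L with
  | nil => exact absurd rfl h
  | cons b r => exact pvJoin_cons_cons a b r

theorem pvPairsA_ne_nil (c : Nat) (l : List String) (h : l ≠ []) : pvPairsA c l ≠ [] := by
  cases l with
  | nil => exact absurd rfl h
  | cons x t => cases t <;> simp [pvPairsA]

theorem pvFlatB_ne_nil (s : Int) (l : List String) (h : l ≠ []) : pvFlatB s l ≠ [] := by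
  cases l with
  | nil => exact absurd rfl h
  | cons x t => simp [pvFlatB]

theorem pvL3 : ∀ (ms : List String) (c : Nat),
    PySem.Str.join " " (pvPairsA c ms) = PySem.Str.join " " (pvFlatB ((2 * c : Nat) : Int) ms)
  | [], c => by simp [pvPairsA, pvFlatB]
  | [x], c => by
      simp only [pvPairsA, pvFlatB, pvTokB]
      rw [if_pos (pv_mod_even c), pv_fdiv_even]
  | x :: y :: rest, c => by
      have hT : pvTokB ((2 * c : Nat) : Int) x
          = PySem.Int.toStr ((c : Int) + 1) ++ ". " ++ x := by
        simp only [pvTokB]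
        rw [if_pos (pv_mod_even c), pv_fdiv_even]
      have hY : pvTokB (((2 * c : Nat) : Int) + 1) y = y := by
        simp only [pvTokB]
        rw [if_neg (by rw [pv_mod_odd]; norm_num)]
      have htail : ((2 * c : Nat) : Int) + 1 + 1 = ((2 * (c + 1) : Nat) : Int) := by
        push_cast; ring
      have e2 : pvFlatB ((2 * c : Nat) : Int) (x :: y :: rest)
          = pvTokB ((2 * c : Nat) : Int) x
            :: pvTokB (((2 * c : Nat) : Int) + 1) y
            :: pvFlatB (((2 * c : Nat) : Int) + 1 + 1) rest := rfl
      cases rest with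
      | nil =>
          show PySem.Str.join " " [PySem.Int.toStr ((c : Int) + 1) ++ ". " ++ x ++ " " ++ y] = _
          rw [e2, show pvFlatB (((2 * c : Nat) : Int) + 1 + 1) ([] : List String) = [] from rfl,
              pvJoin_singleton, pvJoin_cons_cons, pvJoin_singleton, hT, hY]
      | cons z zs =>
          show PySem.Str.join " "
              ((PySem.Int.toStr ((c : Int) + 1) ++ ". " ++ x ++ " " ++ y)
                :: pvPairsA (c + 1) (z :: zs)) = _
          rw [e2, pvJoin_cons_ne _ _ (pvPairsA_ne_nil (c + 1) (z :: zs) (by simp)),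
              pvJoin_cons_cons,
              pvJoin_cons_ne _ _ (pvFlatB_ne_nil _ (z :: zs) (by simp)),
              hT, hY, htail, pvL3 (z :: zs) (c + 1)]
          apply pvStr_eq_of_toList
          simp [List.append_assoc]

-- ===== VERDICT (by name: the statement is the Claim_ definition above) =====
theorem format_moves_spec : Claim_equal_format_moves := by
  intro moves_str _
  show PySem.Str.join " "
      ((PySem.List.pyRange 0 (PySem.List.len (PySem.Str.split₀ moves_str)) 2).foldl
        (fun acc i => acc ++ [pvTokA (PySem.Str.split₀ moves_str) i]) [])
    = PySem.Str.join " "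
      ((PySem.List.enumerate (PySem.Str.split₀ moves_str) 0).map
        (fun p =>
          if PySem.Int.mod p.1 2 = 0 then
            PySem.Int.toStr (PySem.Int.floordiv p.1 2 + 1) ++ ". " ++ p.2
          else p.2))
  rw [PySem.List.foldl_append_singleton_eq_map (pvTokA (PySem.Str.split₀ moves_str)),
      List.nil_append, pvL2]
  have h0 : ((2 * 0 : Nat) : Int) = 0 := by norm_num
  have hms := pvL1 (PySem.Str.split₀ moves_str) (PySem.Str.split₀ moves_str) 0 (by simp)
  have h3 := pvL3 (PySem.Str.split₀ moves_str) 0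
  rw [h0] at hms h3
  rw [hms]
  exact h3
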